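-- pv_equiv track=rewrite | github.com/912-Daraban-Tudor/bank-account-manager | functions.py | remove_type
-- ===== SOURCE A (Python) =====
-- def get_type(account):
--     return account[2]
--
-- def remove_type(account, type):
--     """
--     function removes transactions of a certain type
--     :param account: list of transactions
--     :param type: given type in/out
--     :return:processed list of transations
--     """
--     try:
--         i = 0
--         while i < len(account):
--             if get_type(account[i]) == type:
--                 account.pop(i)
--                 i -= 1
--             i += 1
--         return account
--     except:
--         raise ValueError
-- ===== SOURCE B (Python) =====
-- def remove_type(account, type):
--     """Remove all transactions whose type field (index 2) equals `type`.
--     Single-pass filter assigned back in place, instead of A's index/pop loop."""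
--     account[:] = [t for t in account if t[2] != type]
--     return account
-- ===== Notes on version B (the rewrite author's own statement) =====
-- stated objective: simpler
-- what changed: A scans with an index and pops matching elements one by one (quadratic shifting); B builds the kept transactions in one comprehension pass and splices them back in place.
import Mathlib
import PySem

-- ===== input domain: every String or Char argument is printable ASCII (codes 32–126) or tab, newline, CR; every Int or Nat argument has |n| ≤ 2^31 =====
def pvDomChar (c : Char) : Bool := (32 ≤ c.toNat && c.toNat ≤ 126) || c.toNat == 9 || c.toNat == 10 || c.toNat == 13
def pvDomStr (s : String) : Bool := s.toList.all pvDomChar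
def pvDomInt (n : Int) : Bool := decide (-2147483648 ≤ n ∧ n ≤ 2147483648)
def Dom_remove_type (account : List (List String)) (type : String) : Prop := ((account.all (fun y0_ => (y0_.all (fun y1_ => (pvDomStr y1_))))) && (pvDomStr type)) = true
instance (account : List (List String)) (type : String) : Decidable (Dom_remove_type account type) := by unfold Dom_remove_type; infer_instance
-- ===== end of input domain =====

-- B replaces A's index-and-pop while loop by a single filter pass spliced back in place;
-- equivalence is about the RETURN value (both Pythons also mutate `account` to that same value).

-- ===== PORT A =====
-- A's while loop: index i scans the list; a matching row is popped (i -= 1; i += 1 leaves i unchanged).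
-- `account.pop(i)` with 0 ≤ i < len(account) is exactly List.eraseIdx i (cf. PySem.List.pop?_natCast);
-- `account[i]` is in range because the loop condition guarantees i < len(account).
def remove_type_go (account : List (List String)) (type : String) (i : Nat) : List (List String) :=
  if h : i < account.length then
    if PySem.List.pyGet? account[i] 2 = some type then
      remove_type_go (account.eraseIdx i) type i
    else
      remove_type_go account type (i + 1)
  else
    account
termination_by account.length - i
decreasing_by
  · have := List.length_eraseIdx_of_lt (l := account) (i := i) h; omega
  · omega

def remove_type (account : List (List String)) (type : String) : List (List String) :=
  remove_type_go account type 0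

-- ===== PORT B =====
-- B: one comprehension keeping the rows whose field 2 differs from `type`.
def remove_type_alt (account : List (List String)) (type : String) : List (List String) :=
  account.filter (fun t => PySem.List.pyGet? t 2 != some type)

-- ===== PRECONDITION & SPEC =====
-- Pre_ excludes exactly the inputs on which Python A raises (ValueError from its except:
-- some transaction has no index 2, i.e. fewer than 3 fields); B raises there too.
def Pre_remove_type (account : List (List String)) (type : String) : Prop :=
  ∀ t ∈ account, 3 ≤ t.length
instance (account : List (List String)) (type : String) : Decidable (Pre_remove_type account type) := by unfold Pre_remove_type; infer_instance

def pvWitness_remove_type : List (List String) × String :=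
  ([["1", "2", "in"], ["3", "4", "out"]], "in")

def Spec_remove_type (account : List (List String)) (type : String) (out : List (List String)) : Prop := out = remove_type_alt account type
instance (account : List (List String)) (type : String) (out : List (List String)) : Decidable (Spec_remove_type account type out) := by unfold Spec_remove_type; infer_instance

-- ===== CLAIM (what is proved, stated in full; the proofs are below) =====
def Claim_equal_remove_type : Prop := ∀ (account : List (List String)) (type : String), Dom_remove_type account type → Pre_remove_type account type → Spec_remove_type account type (remove_type account type)

-- ===== LEMMAS AND PROOFS =====

-- Loop invariant: at index i the first i rows are already settled (kept), and the loop
-- filters the remainder.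
theorem remove_type_go_eq (account : List (List String)) (type : String) (i : Nat) :
    remove_type_go account type i =
      account.take i ++ (account.drop i).filter (fun t => PySem.List.pyGet? t 2 != some type) := by
  fun_induction remove_type_go account type i with
  | case1 account i h heq ih =>
      rw [ih, List.eraseIdx_eq_take_drop_succ,
          List.take_append_of_le_length (by simp [List.length_take]; try omega),
          List.take_take, min_self,
          List.drop_append_of_le_length (by simp [List.length_take]; try omega),
          List.drop_of_length_le (by simp [List.length_take]; try omega), List.nil_append]
      conv_rhs => rw [List.drop_eq_getElem_cons h, List.filter_cons]
      simp [heq]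
  | case2 account i h heq ih =>
      rw [ih, List.take_add_one, List.getElem?_eq_getElem h]
      conv_rhs => rw [List.drop_eq_getElem_cons h, List.filter_cons]
      have hp : (PySem.List.pyGet? account[i] 2 != some type) = true := by
        simpa using heq
      rw [hp]
      simp only [Option.toList_some, List.append_assoc, List.singleton_append, if_pos trivial]
  | case3 account i h =>
      have : account.length ≤ i := by omega
      rw [List.take_of_length_le this, List.drop_of_length_le this]
      simp

-- ===== VERDICT (by name: the statement is the Claim_ definition above) =====
theorem remove_type_spec : Claim_equal_remove_type := by
  intro account type _ _
  show remove_type account type = remove_type_alt account type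
  rw [remove_type, remove_type_go_eq]
  simp [remove_type_alt]
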